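-- pv_equiv track=rewrite | github.com/Yeon1122/2025_Algorithm_Study | L/1_week/월말평가_12_analyze_treasures.py | analyze_treasures
-- ===== SOURCE A (Python) =====
-- def analyze_treasures(treasure_list, threshold):
--     pass
--
--     count_dic = {}
--     over_threshold = 0
--
--     for treasure in treasure_list:
--         if treasure in count_dic:
--             count_dic[treasure] += 1
--         else:
--             count_dic[treasure] = 1
--
--     for v in count_dic.values():
--         if v > threshold:
--             over_threshold += 1
--
--     return(count_dic, over_threshold)
-- ===== SOURCE B (Python) =====
-- def analyze_treasures(treasure_list, threshold):
--     # single fused pass: maintain counts and the over-threshold tally together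
--     count_dic = {}
--     over_threshold = 0
--     for treasure in treasure_list:
--         c = count_dic.get(treasure)
--         if c is not None:
--             count_dic[treasure] = c + 1
--             if c + 1 > threshold and not (c > threshold):
--                 over_threshold += 1
--         else:
--             count_dic[treasure] = 1
--             if 1 > threshold:
--                 over_threshold += 1
--     return (count_dic, over_threshold)
-- ===== Notes on version B (the rewrite author's own statement) =====
-- stated objective: alternative
-- what changed: B fuses A's two passes (build counter, then scan values) into one loop that updates the count and increments over_threshold exactly when a count first crosses the threshold.
import Mathlib
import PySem

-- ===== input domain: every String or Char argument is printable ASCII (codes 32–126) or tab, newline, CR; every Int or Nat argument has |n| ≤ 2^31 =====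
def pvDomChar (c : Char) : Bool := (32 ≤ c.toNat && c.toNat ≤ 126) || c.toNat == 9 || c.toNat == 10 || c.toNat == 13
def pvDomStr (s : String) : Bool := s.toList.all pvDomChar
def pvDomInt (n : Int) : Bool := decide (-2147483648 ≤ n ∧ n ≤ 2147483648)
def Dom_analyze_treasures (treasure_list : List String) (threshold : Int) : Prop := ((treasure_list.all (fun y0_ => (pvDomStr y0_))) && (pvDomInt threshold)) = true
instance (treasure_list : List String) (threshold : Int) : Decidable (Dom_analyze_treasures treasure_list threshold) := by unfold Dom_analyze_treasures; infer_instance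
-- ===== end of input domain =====

-- B fuses A's two passes into one loop with incremental threshold accounting; same result, proved below.

-- ===== PORT A =====
def analyze_treasures (treasure_list : List String) (threshold : Int) : (List (String × Int)) × Int :=
  let count_dic : PySem.Dict String Int :=
    treasure_list.foldl (fun d treasure =>
      if d.contains treasure then d.insert treasure (d.getD treasure 0 + 1)
      else d.insert treasure 1) PySem.Dict.empty
  let over_threshold : Int :=
    count_dic.values.foldl (fun acc v => if v > threshold then acc + 1 else acc) 0
  (count_dic.items, over_threshold)

-- ===== PORT B =====
def analyze_treasures_alt (treasure_list : List String) (threshold : Int) : (List (String × Int)) × Int :=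
  let st : PySem.Dict String Int × Int :=
    treasure_list.foldl (fun (st : PySem.Dict String Int × Int) treasure =>
      match st.1.get? treasure with
      | some c =>
          (st.1.insert treasure (c + 1),
           if c + 1 > threshold ∧ ¬ (c > threshold) then st.2 + 1 else st.2)
      | none =>
          (st.1.insert treasure 1,
           if (1 : Int) > threshold then st.2 + 1 else st.2))
      (PySem.Dict.empty, 0)
  (st.1.items, st.2)

-- ===== PRECONDITION & SPEC =====
def Spec_analyze_treasures (treasure_list : List String) (threshold : Int) (out : (List (String × Int)) × Int) : Prop := out = analyze_treasures_alt treasure_list threshold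
instance (treasure_list : List String) (threshold : Int) (out : (List (String × Int)) × Int) : Decidable (Spec_analyze_treasures treasure_list threshold out) := by unfold Spec_analyze_treasures; infer_instance

-- ===== CLAIM (what is proved, stated in full; the proofs are below) =====
def Claim_equal_analyze_treasures : Prop := ∀ (treasure_list : List String) (threshold : Int), Dom_analyze_treasures treasure_list threshold → Spec_analyze_treasures treasure_list threshold (analyze_treasures treasure_list threshold)

-- ===== LEMMAS AND PROOFS =====

-- number of stored counts exceeding the threshold, as A's second pass computes it
def pvCnt (threshold : Int) (d : PySem.Dict String Int) : Int :=
  d.values.foldl (fun acc v => if v > threshold then acc + 1 else acc) 0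

theorem pvFoldlCount (threshold : Int) (vs : List Int) (acc : Int) :
    vs.foldl (fun acc v => if v > threshold then acc + 1 else acc) acc
      = acc + ((vs.countP (fun v => decide (v > threshold)) : Nat) : Int) := by
  induction vs generalizing acc with
  | nil => simp
  | cons v vs ih =>
    simp only [List.foldl_cons, List.countP_cons, ih]
    by_cases h : v > threshold <;> simp [h] <;> omega

-- replacing the (unique) value stored at key k by v changes the countP of the values by ind(p v) - ind(p c)
theorem pvCountPReplace {κ ν : Type} [BEq κ] [LawfulBEq κ] (p : ν → Bool) (k : κ) (c v : ν) :
    ∀ (its : List (κ × ν)), (its.map (·.1)).Nodup → (k, c) ∈ its →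
      (((its.map (fun q => if q.1 == k then (k, v) else q)).map (fun x => x.2)).countP p)
          + (if p c then 1 else 0)
        = ((its.map (fun x => x.2)).countP p) + (if p v then 1 else 0) := by
  intro its
  induction its with
  | nil => intro _ h; cases h
  | cons q its ih =>
    intro hnd hmem
    simp only [List.map_cons, List.nodup_cons] at hnd
    by_cases hk : q.1 = k
    · have hc : q.2 = c := by
        rcases List.mem_cons.mp hmem with h | h
        · rw [← h]
        · have hm : k ∈ its.map (·.1) := List.mem_map.mpr ⟨(k, c), h, rfl⟩
          exact absurd hm (hk ▸ hnd.1)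
      have hrest : its.map (fun q => if q.1 == k then (k, v) else q) = its := by
        conv_rhs => rw [← List.map_id its]
        apply List.map_congr_left
        intro a ha
        have : a.1 ≠ k := by
          intro h
          exact hnd.1 (by rw [hk, ← h]; exact List.mem_map.mpr ⟨a, ha, rfl⟩)
        simp [this]
      simp only [List.map_cons, List.countP_cons, hrest, hk, BEq.rfl, if_true, ← hc]
      by_cases h1 : p v <;> by_cases h2 : p q.2 <;> simp [h1, h2] <;> omega
    · have hmem' : (k, c) ∈ its := by
        rcases List.mem_cons.mp hmem with h | h
        · exact absurd (congrArg Prod.fst h).symm hk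
        · exact h
      have := ih hnd.2 hmem'
      simp only [List.map_cons, List.countP_cons, beq_iff_eq, hk, if_false]
      omega

theorem pvCntInsertOld (threshold : Int) (d : PySem.Dict String Int) (t : String) (c : Int)
    (hnd : d.keys.Nodup) (h : d.get? t = some c) :
    pvCnt threshold (d.insert t (c + 1)) + (if c > threshold then 1 else 0)
      = pvCnt threshold d + (if c + 1 > threshold then 1 else 0) := by
  have hcon : d.contains t = true := by
    rw [PySem.Dict.contains_eq_isSome_get?, h]; rfl
  have hmem : (t, c) ∈ d.items := PySem.Dict.mem_items_of_get?_eq_some d h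
  have hkeys : (d.items.map (·.1)).Nodup := hnd
  have hrep := pvCountPReplace (fun v => decide (v > threshold)) t c (c + 1) d.items hkeys hmem
  have hitems := PySem.Dict.items_insert_of_contains (d := d) (k := t) (v := c + 1) hcon
  simp only [pvCnt, PySem.Dict.values, hitems, pvFoldlCount]
  by_cases h1 : c > threshold <;> by_cases h2 : c + 1 > threshold <;>
    simp [h1, h2] at hrep ⊢ <;> omega

theorem pvCntInsertNew (threshold : Int) (d : PySem.Dict String Int) (t : String)
    (h : d.contains t = false) :
    pvCnt threshold (d.insert t 1)
      = pvCnt threshold d + (if (1 : Int) > threshold then 1 else 0) := by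
  have hitems := PySem.Dict.items_insert_of_not_contains (d := d) (k := t) (v := 1) h
  simp only [pvCnt, PySem.Dict.values, pvFoldlCount, hitems, List.map_append, List.countP_append]
  by_cases h1 : (1 : Int) > threshold <;> simp [h1, List.countP_cons] <;> omega

theorem pvMain (threshold : Int) :
    ∀ (l : List String) (d : PySem.Dict String Int) (x : Int), d.keys.Nodup →
      l.foldl (fun (st : PySem.Dict String Int × Int) treasure =>
        match st.1.get? treasure with
        | some c =>
            (st.1.insert treasure (c + 1),
             if c + 1 > threshold ∧ ¬ (c > threshold) then st.2 + 1 else st.2)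
        | none =>
            (st.1.insert treasure 1,
             if (1 : Int) > threshold then st.2 + 1 else st.2)) (d, x)
      = (l.foldl (fun d treasure =>
            if d.contains treasure then d.insert treasure (d.getD treasure 0 + 1)
            else d.insert treasure 1) d,
         x + pvCnt threshold (l.foldl (fun d treasure =>
            if d.contains treasure then d.insert treasure (d.getD treasure 0 + 1)
            else d.insert treasure 1) d) - pvCnt threshold d) := by
  intro l
  induction l with
  | nil => intro d x _; simp
  | cons t l ih =>
    intro d x hnd
    simp only [List.foldl_cons]
    cases hg : d.get? t with
    | some c =>
      have hcon : d.contains t = true := by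
        rw [PySem.Dict.contains_eq_isSome_get?, hg]; rfl
      have hgd : d.getD t 0 = c := PySem.Dict.getD_of_get?_eq_some d 0 hg
      have hnd' : (d.insert t (c + 1)).keys.Nodup := PySem.Dict.nodup_keys_insert _ _ _ hnd
      have hA : (if d.contains t then d.insert t (d.getD t 0 + 1) else d.insert t 1)
          = d.insert t (c + 1) := by simp [hcon, hgd]
      rw [hA, ih (d.insert t (c + 1)) _ hnd']
      have hcnt := pvCntInsertOld threshold d t c hnd hg
      refine Prod.ext rfl ?_
      simp only
      by_cases h1 : c > threshold <;> by_cases h2 : c + 1 > threshold <;>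
        simp only [h1, h2, if_true, if_false, not_true, not_false_iff, and_true, and_false,
          true_and, false_and] at hcnt ⊢ <;> omega
    | none =>
      have hcon : d.contains t = false := by
        rw [PySem.Dict.contains_eq_isSome_get?, hg]; rfl
      have hnd' : (d.insert t 1).keys.Nodup := PySem.Dict.nodup_keys_insert _ _ _ hnd
      have hA : (if d.contains t then d.insert t (d.getD t 0 + 1) else d.insert t 1)
          = d.insert t 1 := by rw [hcon]; simp
      rw [hA, ih (d.insert t 1) _ hnd']
      have hcnt := pvCntInsertNew threshold d t hcon
      refine Prod.ext rfl ?_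
      simp only
      by_cases h1 : (1 : Int) > threshold <;>
        simp only [h1, if_true, if_false] at hcnt ⊢ <;> omega

-- ===== VERDICT (by name: the statement is the Claim_ definition above) =====
theorem analyze_treasures_spec : Claim_equal_analyze_treasures := by
  intro treasure_list threshold _
  unfold Spec_analyze_treasures analyze_treasures analyze_treasures_alt
  rw [pvMain threshold treasure_list PySem.Dict.empty 0 PySem.Dict.nodup_keys_empty]
  simp only
  refine Prod.ext rfl ?_
  simp only [pvCnt, PySem.Dict.values, PySem.Dict.empty, PySem.Dict.items, List.map_nil,
    List.foldl_nil]
  omega
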